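-- pv_equiv track=rewrite | github.com/cocoma6/gait_id | gait_recognition/gait_pretreat.py | check_new_view
-- ===== SOURCE A (Python) =====
-- def check_new_view(previous_idx, cur):
--     if len(previous_idx) > 5:
--         sum = cur - previous_idx[-1]
--         for i in range(1,4):
--             sum += previous_idx[-i] - previous_idx[-i-1]
--         if sum > 40:
--             return True
--     return False
-- ===== SOURCE B (Python) =====
-- def check_new_view(previous_idx, cur):
--     # The summed differences telescope to a single term: cur - previous_idx[-4].
--     return len(previous_idx) > 5 and cur - previous_idx[-4] > 40
-- ===== Notes on version B (the rewrite author's own statement) =====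
-- stated objective: simpler
-- what changed: The loop of pairwise differences telescopes, so B replaces the accumulation loop with the single closed-form comparison cur - previous_idx[-4] > 40 under the same length guard.
import Mathlib
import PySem

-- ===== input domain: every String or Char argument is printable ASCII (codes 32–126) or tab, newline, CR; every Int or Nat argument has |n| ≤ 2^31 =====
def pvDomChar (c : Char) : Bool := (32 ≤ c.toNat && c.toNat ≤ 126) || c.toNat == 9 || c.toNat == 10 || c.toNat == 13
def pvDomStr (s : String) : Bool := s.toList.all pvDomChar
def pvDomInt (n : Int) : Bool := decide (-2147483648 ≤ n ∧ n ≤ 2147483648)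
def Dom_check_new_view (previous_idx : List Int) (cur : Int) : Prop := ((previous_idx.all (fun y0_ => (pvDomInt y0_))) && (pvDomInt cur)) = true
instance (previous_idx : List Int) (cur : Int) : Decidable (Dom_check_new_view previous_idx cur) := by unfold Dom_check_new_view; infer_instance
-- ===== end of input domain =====

-- B replaces A's telescoping difference loop with the single closed-form comparison cur - previous_idx[-4] > 40 (objective: simpler).

-- ===== PORT A =====
-- A's negative indexes are always in range under the len > 5 guard, so .getD 0 is never taken.
def pvGetA (previous_idx : List Int) (i : Int) : Int := (PySem.List.pyGet? previous_idx i).getD 0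

def check_new_view (previous_idx : List Int) (cur : Int) : Bool :=
  if previous_idx.length > 5 then
    let sum0 := cur - pvGetA previous_idx (-1)
    let sum := (PySem.List.pyRange 1 4 1).foldl
      (fun s i => s + (pvGetA previous_idx (-i) - pvGetA previous_idx (-i - 1))) sum0
    if sum > 40 then true else false
  else false

-- ===== PORT B =====
def check_new_view_alt (previous_idx : List Int) (cur : Int) : Bool :=
  decide (previous_idx.length > 5) && decide (cur - (PySem.List.pyGet? previous_idx (-4)).getD 0 > 40)

-- ===== PRECONDITION & SPEC =====
def Spec_check_new_view (previous_idx : List Int) (cur : Int) (out : Bool) : Prop := out = check_new_view_alt previous_idx cur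
instance (previous_idx : List Int) (cur : Int) (out : Bool) : Decidable (Spec_check_new_view previous_idx cur out) := by unfold Spec_check_new_view; infer_instance

-- ===== CLAIM (what is proved, stated in full; the proofs are below) =====
def Claim_equal_check_new_view : Prop := ∀ (previous_idx : List Int) (cur : Int), Dom_check_new_view previous_idx cur → Spec_check_new_view previous_idx cur (check_new_view previous_idx cur)

-- ===== LEMMAS AND PROOFS =====

-- ===== VERDICT (by name: the statement is the Claim_ definition above) =====
theorem check_new_view_spec : Claim_equal_check_new_view := by
  intro xs cur _
  unfold Spec_check_new_view check_new_view check_new_view_alt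
  by_cases h : xs.length > 5
  · simp only [h, if_pos, decide_true, Bool.true_and]
    have : (PySem.List.pyRange 1 4 1).foldl
        (fun s i => s + (pvGetA xs (-i) - pvGetA xs (-i - 1))) (cur - pvGetA xs (-1))
        = cur - pvGetA xs (-4) := by
      have : PySem.List.pyRange 1 4 1 = [1, 2, 3] := by decide
      rw [this]; simp only [List.foldl]; ring_nf
    rw [this]
    simp [pvGetA]
  · simp [h]
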